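-- pv_equiv track=rewrite | github.com/cda2/BJ | python/src/bj9465.py | solution
-- ===== SOURCE A (Python) =====
-- def solution(size: int, stickers: list[list[int]]):
--     dp: list[list[int]] = [[0, 0] for i in range(size)]
--     for x in range(size):
--         for y in range(2):
--             dp[x][y] = max(
--                 max(get_val(x - 2, dp)) + stickers[y][x],
--                 get_val(x - 1, dp)[(y + 1) % 2] + stickers[y][x],
--             )
--     return max(dp[size - 1])
--
-- def get_val(x: int, dp: list[list[int]]):
--     if x < 0:
--         return [0, 0]
--     else:
--         return dp[x]
-- ===== SOURCE B (Python) =====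
-- def solution(size: int, stickers: list[list[int]]):
--     # Max-plus (tropical) linear algebra: each column becomes a 3x3 transfer
--     # matrix over (max, +) with None as -infinity; the matrices for columns
--     # 1..size-1 are combined by a divide-and-conquer product and applied to the
--     # first-column state vector.  State = (take-top, take-bottom, best of the
--     # previous column).
--     def madd(a, b):  # max, None = -infinity
--         if a is None:
--             return b
--         if b is None:
--             return a
--         return a if a >= b else b
--     def mmul(a, b):  # plus, None absorbing
--         if a is None or b is None:
--             return None
--         return a + b
--     def mat(x):
--         s0, s1 = stickers[0][x], stickers[1][x]
--         return ((None, s0, s0),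
--                 (s1, None, s1),
--                 (0, 0, None))
--     def matmul(A, B):
--         return tuple(
--             tuple(madd(mmul(A[i][0], B[0][j]),
--                        madd(mmul(A[i][1], B[1][j]),
--                             mmul(A[i][2], B[2][j])))
--                   for j in range(3))
--             for i in range(3))
--     def prod(lo, hi):  # M[hi-1] x ... x M[lo], divide and conquer
--         if hi - lo == 1:
--             return mat(lo)
--         mid = (lo + hi) // 2
--         return matmul(prod(mid, hi), prod(lo, mid))
--     def apply(M, v):
--         return tuple(madd(mmul(M[i][0], v[0]),
--                           madd(mmul(M[i][1], v[1]),
--                                mmul(M[i][2], v[2])))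
--                      for i in range(3))
--     v = (stickers[0][0], stickers[1][0], 0)
--     if size > 1:
--         v = apply(prod(1, size), v)
--     return madd(v[0], v[1])
-- ===== Notes on version B (the rewrite author's own statement) =====
-- stated objective: alternative
-- what changed: Recasts the DP as max-plus (tropical) linear algebra: each column 1..size-1 becomes a 3x3 transfer matrix (states: take top, take bottom, best of previous column) and the answer is read off a divide-and-conquer product of these matrices applied to the first-column vector, instead of filling a dp table cell by cell with a negative-index helper.
import Mathlib
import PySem

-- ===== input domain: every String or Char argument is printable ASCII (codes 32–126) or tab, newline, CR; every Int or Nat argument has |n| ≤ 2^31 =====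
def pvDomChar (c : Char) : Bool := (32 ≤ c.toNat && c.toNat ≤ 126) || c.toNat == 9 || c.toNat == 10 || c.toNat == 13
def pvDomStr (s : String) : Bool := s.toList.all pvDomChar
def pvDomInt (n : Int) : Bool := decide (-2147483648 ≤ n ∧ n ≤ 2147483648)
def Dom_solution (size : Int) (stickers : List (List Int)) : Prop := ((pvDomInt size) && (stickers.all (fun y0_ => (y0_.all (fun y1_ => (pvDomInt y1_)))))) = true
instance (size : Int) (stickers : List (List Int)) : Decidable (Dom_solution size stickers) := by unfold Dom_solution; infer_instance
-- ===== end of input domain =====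

-- B recasts A's dp table as max-plus (tropical) linear algebra: a divide-and-conquer product of 3x3 column transfer matrices; alternative algorithm, same answers.


-- ===== PORT A =====
-- get_val(x, dp): Python dp[x] is always in range at the call sites admitted by Pre_, so getD is exact there
def getVal (x : Int) (dp : List (List Int)) : List Int :=
  if x < 0 then [0, 0] else dp.getD x.toNat []

-- body of the 'for x' loop: runs the inner 'for y in range(2)' unfolded into its two iterations,
-- each writing dp[x][y] exactly as the Python does
def stepA (stickers : List (List Int)) (dp : List (List Int)) (x : Nat) : List (List Int) :=
  -- y = 0
  let s0 := (stickers.getD 0 []).getD x 0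
  let a := getVal ((x : Int) - 2) dp
  let b := getVal ((x : Int) - 1) dp
  let v0 := max (max (a.getD 0 0) (a.getD 1 0) + s0) (b.getD 1 0 + s0)
  let dp1 := dp.set x [v0, (dp.getD x []).getD 1 0]
  -- y = 1
  let s1 := (stickers.getD 1 []).getD x 0
  let a1 := getVal ((x : Int) - 2) dp1
  let b1 := getVal ((x : Int) - 1) dp1
  let v1 := max (max (a1.getD 0 0) (a1.getD 1 0) + s1) (b1.getD 0 0 + s1)
  dp1.set x [(dp1.getD x []).getD 0 0, v1]

def solution (size : Int) (stickers : List (List Int)) : Int :=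
  let n := size.toNat
  let dp0 : List (List Int) := List.replicate n [0, 0]
  let dpF := (List.range n).foldl (stepA stickers) dp0
  let last := dpF.getD (size - 1).toNat []   -- dp[size-1]; in range under Pre_
  max (last.getD 0 0) (last.getD 1 0)

-- ===== PORT B =====
-- max-plus scalars: Option Int, none = -infinity (Python's None)
def madd (a b : Option Int) : Option Int :=
  match a, b with
  | none, b => b
  | a, none => a
  | some x, some y => some (max x y)

def mmul (a b : Option Int) : Option Int :=
  match a, b with
  | none, _ => none
  | _, none => none
  | some x, some y => some (x + y)

-- a vector is a triple, a matrix a triple of rows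
def dotV (r v : Option Int × Option Int × Option Int) : Option Int :=
  madd (mmul r.1 v.1) (madd (mmul r.2.1 v.2.1) (mmul r.2.2 v.2.2))

def applyV (M : (Option Int × Option Int × Option Int) × (Option Int × Option Int × Option Int) × (Option Int × Option Int × Option Int))
    (v : Option Int × Option Int × Option Int) : Option Int × Option Int × Option Int :=
  (dotV M.1 v, dotV M.2.1 v, dotV M.2.2 v)

def colV (M : (Option Int × Option Int × Option Int) × (Option Int × Option Int × Option Int) × (Option Int × Option Int × Option Int))
    : ((Option Int × Option Int × Option Int) × (Option Int × Option Int × Option Int) × (Option Int × Option Int × Option Int)) :=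
  ((M.1.1, M.2.1.1, M.2.2.1), (M.1.2.1, M.2.1.2.1, M.2.2.2.1), (M.1.2.2, M.2.1.2.2, M.2.2.2.2))

def matmulM (A B : (Option Int × Option Int × Option Int) × (Option Int × Option Int × Option Int) × (Option Int × Option Int × Option Int)) :
    (Option Int × Option Int × Option Int) × (Option Int × Option Int × Option Int) × (Option Int × Option Int × Option Int) :=
  let c := colV B
  ((dotV A.1 c.1, dotV A.1 c.2.1, dotV A.1 c.2.2),
   (dotV A.2.1 c.1, dotV A.2.1 c.2.1, dotV A.2.1 c.2.2),
   (dotV A.2.2 c.1, dotV A.2.2 c.2.1, dotV A.2.2 c.2.2))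

-- transfer matrix of column x
def mkMat (stickers : List (List Int)) (x : Nat) :
    (Option Int × Option Int × Option Int) × (Option Int × Option Int × Option Int) × (Option Int × Option Int × Option Int) :=
  let s0 := (stickers.getD 0 []).getD x 0
  let s1 := (stickers.getD 1 []).getD x 0
  ((none, some s0, some s0), (some s1, none, some s1), (some 0, some 0, none))

-- prod(lo, hi) = M[hi-1] x ... x M[lo], divide and conquer (called with lo < hi)
def prodB (stickers : List (List Int)) (lo hi : Nat) :
    (Option Int × Option Int × Option Int) × (Option Int × Option Int × Option Int) × (Option Int × Option Int × Option Int) :=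
  if h : hi ≤ lo + 1 then mkMat stickers lo
  else
    let mid := (lo + hi) / 2
    matmulM (prodB stickers mid hi) (prodB stickers lo mid)
termination_by hi - lo
decreasing_by all_goals omega

def solution_alt (size : Int) (stickers : List (List Int)) : Int :=
  let v0 : Option Int × Option Int × Option Int :=
    (some ((stickers.getD 0 []).getD 0 0), some ((stickers.getD 1 []).getD 0 0), some 0)
  let v := if 1 < size then applyV (prodB stickers 1 size.toNat) v0 else v0
  (madd v.1 v.2.1).getD 0   -- both components are some here; getD is exact

-- ===== PRECONDITION & SPEC =====
-- exactly where the Python A returns: size ≥ 1, two sticker rows present, each at least size long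
def Pre_solution (size : Int) (stickers : List (List Int)) : Prop :=
  1 ≤ size ∧ 2 ≤ stickers.length ∧
  size ≤ ((stickers.getD 0 []).length : Int) ∧ size ≤ ((stickers.getD 1 []).length : Int)
instance (size : Int) (stickers : List (List Int)) : Decidable (Pre_solution size stickers) := by
  unfold Pre_solution; infer_instance

def pvWitness_solution : Int × List (List Int) := (2, [[5, 1], [3, 4]])

def Spec_solution (size : Int) (stickers : List (List Int)) (out : Int) : Prop := out = solution_alt size stickers
instance (size : Int) (stickers : List (List Int)) (out : Int) : Decidable (Spec_solution size stickers out) := by unfold Spec_solution; infer_instance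

-- ===== CLAIM (what is proved, stated in full; the proofs are below) =====
def Claim_equal_solution : Prop := ∀ (size : Int) (stickers : List (List Int)), Dom_solution size stickers → Pre_solution size stickers → Spec_solution size stickers (solution size stickers)

-- ===== LEMMAS AND PROOFS =====

theorem madd_comm (a b : Option Int) : madd a b = madd b a := by
  cases a <;> cases b <;> simp [madd, max_comm]

theorem madd_assoc (a b c : Option Int) : madd (madd a b) c = madd a (madd b c) := by
  cases a <;> cases b <;> cases c <;> simp [madd, max_assoc]

theorem madd_left_comm (a b c : Option Int) : madd a (madd b c) = madd b (madd a c) := by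
  rw [← madd_assoc, madd_comm a b, madd_assoc]

theorem mmul_assoc (a b c : Option Int) : mmul (mmul a b) c = mmul a (mmul b c) := by
  cases a <;> cases b <;> cases c <;> simp [mmul, add_assoc]

theorem mmul_madd_left (a b c : Option Int) : mmul a (madd b c) = madd (mmul a b) (mmul a c) := by
  cases a <;> cases b <;> cases c <;> simp [mmul, madd]

theorem mmul_madd_right (a b c : Option Int) : mmul (madd a b) c = madd (mmul a c) (mmul b c) := by
  cases a <;> cases b <;> cases c <;> simp [mmul, madd]

-- matrix-vector associativity: applying a product = applying the factors in turn
theorem mv_assoc (A B : (Option Int × Option Int × Option Int) × (Option Int × Option Int × Option Int) × (Option Int × Option Int × Option Int))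
    (v : Option Int × Option Int × Option Int) :
    applyV (matmulM A B) v = applyV A (applyV B v) := by
  obtain ⟨⟨a00, a01, a02⟩, ⟨a10, a11, a12⟩, ⟨a20, a21, a22⟩⟩ := A
  obtain ⟨⟨b00, b01, b02⟩, ⟨b10, b11, b12⟩, ⟨b20, b21, b22⟩⟩ := B
  obtain ⟨v0, v1, v2⟩ := v
  simp only [applyV, matmulM, colV, dotV, mmul_madd_left, mmul_madd_right, mmul_assoc, madd_assoc]
  refine Prod.ext ?_ (Prod.ext ?_ ?_) <;> simp [madd_left_comm]

-- the D&C product applied to a vector = left-to-right fold of the column matrices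
theorem prodB_spec (stickers : List (List Int)) (lo hi : Nat) (hlt : lo < hi)
    (v : Option Int × Option Int × Option Int) :
    applyV (prodB stickers lo hi) v =
      (List.range' lo (hi - lo)).foldl (fun w x => applyV (mkMat stickers x) w) v := by
  rw [prodB]
  split
  · rename_i h
    have h1 : hi - lo = 1 := by omega
    simp [h1]
  · rename_i h
    have hmid1 : lo < (lo + hi) / 2 := by omega
    have hmid2 : (lo + hi) / 2 < hi := by omega
    rw [mv_assoc, prodB_spec stickers lo ((lo + hi) / 2) hmid1,
      prodB_spec stickers ((lo + hi) / 2) hi hmid2]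
    have hsplit : List.range' lo (hi - lo) =
        List.range' lo ((lo + hi) / 2 - lo) ++ List.range' ((lo + hi) / 2) (hi - (lo + hi) / 2) := by
      have h2 : List.range' lo ((lo + hi) / 2 - lo)
            ++ List.range' (lo + ((lo + hi) / 2 - lo)) (hi - (lo + hi) / 2)
          = List.range' lo (((lo + hi) / 2 - lo) + (hi - (lo + hi) / 2)) :=
        List.range'_append_1
      rw [show lo + ((lo + hi) / 2 - lo) = (lo + hi) / 2 by omega] at h2
      rw [h2]
      congr 1
      omega
    rw [hsplit, List.foldl_append]
termination_by hi - lo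
decreasing_by all_goals omega

-- helper facts about the dp table updates
theorem getVal_set_lt (x : Int) (k : Nat) (v : List Int) (dp : List (List Int))
    (h : x < (k : Int)) : getVal x (dp.set k v) = getVal x dp := by
  unfold getVal
  split
  · rfl
  · rename_i hx
    have hne : k ≠ x.toNat := by omega
    simp [List.getD_eq_getElem?_getD, List.getElem?_set_ne hne]

theorem getD_set_self (l : List (List Int)) (i : Nat) (v : List Int) (h : i < l.length) :
    (l.set i v).getD i [] = v := by
  simp [List.getD_eq_getElem?_getD, h]

theorem getD_set_ne (l : List (List Int)) (i j : Nat) (v : List Int) (h : i ≠ j) :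
    (l.set i v).getD j [] = l.getD j [] := by
  simp [List.getD_eq_getElem?_getD, List.getElem?_set_ne h]

-- A's two in-place writes at column k collapse to one set of the pair [v0, v1]
theorem stepA_char (stickers dp : List (List Int)) (k : Nat)
    (hk : k < dp.length) (h0 : dp.getD k [] = [0, 0]) :
    stepA stickers dp k = dp.set k
      [max (max ((getVal ((k : Int) - 2) dp).getD 0 0) ((getVal ((k : Int) - 2) dp).getD 1 0)
            + (stickers.getD 0 []).getD k 0)
         ((getVal ((k : Int) - 1) dp).getD 1 0 + (stickers.getD 0 []).getD k 0),
       max (max ((getVal ((k : Int) - 2) dp).getD 0 0) ((getVal ((k : Int) - 2) dp).getD 1 0)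
            + (stickers.getD 1 []).getD k 0)
         ((getVal ((k : Int) - 1) dp).getD 0 0 + (stickers.getD 1 []).getD k 0)] := by
  unfold stepA
  simp only [h0, List.getD_cons_zero, List.getD_cons_succ]
  rw [getVal_set_lt _ _ _ _ (by omega), getVal_set_lt _ _ _ _ (by omega),
    getD_set_self _ _ _ hk, List.set_set]
  simp only [List.getD_cons_zero]

-- invariant tying A's dp table after k columns to B's max-plus state after k-1 matrix applications
def StateInv (stickers : List (List Int)) (n k : Nat) : Prop :=
  let dpk := (List.range k).foldl (stepA stickers) (List.replicate n [0, 0])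
  let vk := (List.range' 1 (k - 1)).foldl (fun w x => applyV (mkMat stickers x) w)
    (some ((stickers.getD 0 []).getD 0 0), some ((stickers.getD 1 []).getD 0 0), some 0)
  dpk.length = n ∧
  (∀ i, k ≤ i → i < n → dpk.getD i [] = [0, 0]) ∧
  vk = (some ((dpk.getD (k - 1) []).getD 0 0), some ((dpk.getD (k - 1) []).getD 1 0),
        some (max ((getVal ((k : Int) - 2) dpk).getD 0 0) ((getVal ((k : Int) - 2) dpk).getD 1 0)))

theorem inv_holds (stickers : List (List Int)) (n k : Nat) (h1 : 1 ≤ k) (hk : k ≤ n) :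
    StateInv stickers n k := by
  induction k with
  | zero => omega
  | succ k ih =>
    by_cases hk1 : k = 0
    · -- base case k+1 = 1: one A-step on the all-zero table; B's fold is empty
      subst hk1
      have hn : 0 < n := by omega
      unfold StateInv
      simp only [List.range_succ, List.range_zero, List.nil_append, List.foldl_cons,
        List.foldl_nil, Nat.sub_self, List.range'_zero]
      have hrep0 : (List.replicate n ([0, 0] : List Int)).getD 0 [] = [0, 0] := by
        simp [List.getD_eq_getElem?_getD, hn]
      have hlenr : 0 < (List.replicate n ([0, 0] : List Int)).length := by simpa using hn
      have hgvneg : ∀ (c : Int) (dp : List (List Int)), c < 0 → getVal c dp = [0, 0] := by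
        intro c dp hc; unfold getVal; rw [if_pos hc]
      rw [stepA_char stickers _ 0 hlenr hrep0,
        hgvneg _ _ (by norm_num), hgvneg _ _ (by norm_num)]
      simp only [List.getD_cons_zero, List.getD_cons_succ]
      refine ⟨by simp, ?_, ?_⟩
      · intro i hi hin
        have hne : (0 : Nat) ≠ i := by omega
        rw [getD_set_ne _ _ _ _ hne]
        simp [List.getD_eq_getElem?_getD, hin]
      · rw [getD_set_self _ _ _ hlenr, hgvneg _ _ (by norm_num)]
        simp only [List.getD_cons_zero, List.getD_cons_succ]
        refine Prod.ext ?_ (Prod.ext ?_ ?_) <;> simp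
    · -- inductive step: column k (k ≥ 1)
      have hkk : 1 ≤ k := by omega
      obtain ⟨hlen, hrest, hv⟩ := ih hkk (by omega)
      have hkn : k < n := by omega
      unfold StateInv
      simp only [List.range_succ, List.foldl_append, List.foldl_cons, List.foldl_nil]
      set dpk := (List.range k).foldl (stepA stickers) (List.replicate n [0, 0]) with hdpk
      have hrange' : (k + 1) - 1 = (k - 1) + 1 := by omega
      rw [hrange', List.range'_concat]
      have h1k : 1 + 1 * (k - 1) = k := by omega
      rw [h1k, List.foldl_append, List.foldl_cons, List.foldl_nil, hv]
      have hkl : k < dpk.length := by omega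
      have hdk : dpk.getD k [] = [0, 0] := hrest k (le_refl k) hkn
      rw [stepA_char stickers dpk k hkl hdk]
      set a := getVal ((k : Int) - 2) dpk with ha
      set s0 := (stickers.getD 0 []).getD k 0 with hs0
      set s1 := (stickers.getD 1 []).getD k 0 with hs1
      have hbval : getVal ((k : Int) - 1) dpk = dpk.getD (k - 1) [] := by
        unfold getVal
        rw [if_neg (by omega)]
        congr 1; omega
      rw [hbval]
      set p := dpk.getD (k - 1) [] with hp
      set v0 := max (max (a.getD 0 0) (a.getD 1 0) + s0) (p.getD 1 0 + s0) with hv0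
      set v1 := max (max (a.getD 0 0) (a.getD 1 0) + s1) (p.getD 0 0 + s1) with hv1
      set dp' := dpk.set k [v0, v1] with hdp'
      refine ⟨by rw [hdp']; simpa using hlen, ?_, ?_⟩
      · intro i hi hin
        have hne : k ≠ i := by omega
        rw [hdp', getD_set_ne _ _ _ _ hne]
        exact hrest i (by omega) hin
      · have hd'' : dp'.getD ((k - 1) + 1) [] = [v0, v1] := by
          have he : (k - 1) + 1 = k := by omega
          rw [he, hdp']; exact getD_set_self _ _ _ hkl
        have hgv : getVal ((↑(k + 1) : Int) - 2) dp' = p := by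
          have h2 : ((↑(k + 1) : Int) - 2) = (k : Int) - 1 := by push_cast; ring
          rw [h2, hdp', getVal_set_lt _ _ _ _ (by omega), hbval]
        rw [hd'', hgv]
        simp only [applyV, dotV, mkMat, madd, mmul, ← hs0, ← hs1]
        simp only [List.getD_cons_zero, List.getD_cons_succ]
        refine Prod.ext ?_ (Prod.ext ?_ ?_) <;> simp [hv0, hv1] <;> omega

-- ===== VERDICT (by name: the statement is the Claim_ definition above) =====
theorem solution_spec : Claim_equal_solution := by
  intro size stickers _ hpre
  obtain ⟨h1, -, -, -⟩ := hpre
  unfold Spec_solution solution solution_alt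
  simp only []
  set n := size.toNat with hn
  have hn1 : 1 ≤ n := by omega
  obtain ⟨hlen, -, hv⟩ := inv_holds stickers n n hn1 (le_refl n)
  have hidx : (size - 1).toNat = n - 1 := by omega
  rw [hidx]
  by_cases hsz : 1 < size
  · rw [if_pos hsz, prodB_spec stickers 1 n (by omega), hv]
    simp [madd]
  · have hne1 : n = 1 := by omega
    rw [if_neg hsz]
    rw [hne1] at hv ⊢
    simp only [Nat.sub_self, List.range'_zero, List.foldl_nil] at hv
    have e0 : ((stickers.getD 0 []).getD 0 0)
        = ((((List.range 1).foldl (stepA stickers) (List.replicate 1 [0, 0])).getD (1 - 1) []).getD 0 0) :=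
      Option.some.inj (congrArg Prod.fst hv)
    have e1 : ((stickers.getD 1 []).getD 0 0)
        = ((((List.range 1).foldl (stepA stickers) (List.replicate 1 [0, 0])).getD (1 - 1) []).getD 1 0) :=
      Option.some.inj (congrArg (fun t => t.2.1) hv)
    rw [e0, e1]
    simp [madd]
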